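-- pv_equiv track=rewrite | github.com/Z1longZeng/CSE337python | cseise337_a01.py | is_chaotic
-- ===== SOURCE A (Python) =====
-- def is_chaotic(s):
--     #输入的字符串s只包含a-z
--     char_count={}
--     #用set统计次数
--     for char in s:
--         char_count[char]=char_count.get(char,0)+1
--         #if char in s then return this value and +1, if not, set the value of char to 0
--
--     #check
--     counts=set(char_count.values())#创建一个仅包含字典中所有值的set（这些值不重复）
--
--     if(len(counts)==len(char_count)):#如果char_count的长度（字符数）和counts的长度（不同大小的字符数）相同，说明是chaotic
--         return "TOHRU"
--     else:
--         return "ELMA"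
-- ===== SOURCE B (Python) =====
-- def is_chaotic(s):
--     # Different algorithm: sort the characters so equal ones form contiguous runs,
--     # take the run lengths (no counting dict/set), sort the run lengths and
--     # look for two equal neighbours.
--     runs = _runs(sorted(s))
--     runs.sort()
--     return "ELMA" if any(a == b for a, b in zip(runs, runs[1:])) else "TOHRU"
--
-- def _runs(t):
--     # run lengths of the sorted character list t
--     if not t:
--         return []
--     c = t[0]
--     n = 1
--     while n < len(t) and t[n] == c:
--         n += 1
--     return [n] + _runs(t[n:])
-- ===== Notes on version B (the rewrite author's own statement) =====
-- stated objective: alternative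
-- what changed: Replaces A's single-pass char->count dict plus set-of-values size comparison with sorting the characters, run-length encoding the sorted list, sorting the run lengths and scanning for two equal neighbours.
import Mathlib
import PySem

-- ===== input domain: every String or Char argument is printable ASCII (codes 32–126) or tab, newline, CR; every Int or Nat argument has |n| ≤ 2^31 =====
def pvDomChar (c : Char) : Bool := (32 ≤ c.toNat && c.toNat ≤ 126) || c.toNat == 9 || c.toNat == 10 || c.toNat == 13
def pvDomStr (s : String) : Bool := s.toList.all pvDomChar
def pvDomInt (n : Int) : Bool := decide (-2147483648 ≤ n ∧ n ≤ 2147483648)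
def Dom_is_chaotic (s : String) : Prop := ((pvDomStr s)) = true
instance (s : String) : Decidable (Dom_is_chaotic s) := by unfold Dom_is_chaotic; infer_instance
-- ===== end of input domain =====

-- B replaces A's counting-dict pass by sort + run-length encoding + a sorted
-- adjacent-duplicate scan; objective: alternative algorithm, same return value.


-- ===== PORT A =====
-- for char in s: char_count[char] = char_count.get(char, 0) + 1
-- counts = set(char_count.values()); compare len(counts) with len(char_count)
def is_chaotic (s : String) : String :=
  let char_count : PySem.Dict Char Int :=
    s.toList.foldl (fun d ch => d.insert ch (d.getD ch 0 + 1)) PySem.Dict.empty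
  let counts : PySem.Set Int := PySem.Set.ofList char_count.values
  if PySem.Set.len counts == PySem.Dict.size char_count then "TOHRU" else "ELMA"

-- ===== PORT B =====
-- _runs(t): 'n = 1; while n < len(t) and t[n] == c: n += 1' counts the leading
-- run of t[0], i.e. 1 + length of the equal prefix of the tail; then recurse on t[n:].
def pvRuns : List Char → List Int
  | [] => []
  | c :: cs =>
      ((cs.takeWhile (fun x => x == c)).length + 1 : Int)
        :: pvRuns (cs.dropWhile (fun x => x == c))
  termination_by t => t.length
  decreasing_by
    simpa using Nat.lt_succ_of_le (List.dropWhile_sublist _).length_le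

-- runs = _runs(sorted(s)); runs.sort();
-- "ELMA" if any(a == b for a, b in zip(runs, runs[1:])) else "TOHRU"
def is_chaotic_alt (s : String) : String :=
  let runs := pvRuns (PySem.List.sorted s.toList (fun c => c) false)
  let sortedRuns := PySem.List.sorted runs (fun x => x) false
  if (sortedRuns.zip (sortedRuns.drop 1)).any (fun p => p.1 == p.2)
  then "ELMA" else "TOHRU"

-- ===== PRECONDITION & SPEC =====
def Spec_is_chaotic (s : String) (out : String) : Prop := out = is_chaotic_alt s
instance (s : String) (out : String) : Decidable (Spec_is_chaotic s out) := by unfold Spec_is_chaotic; infer_instance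

-- ===== CLAIM (what is proved, stated in full; the proofs are below) =====
def Claim_equal_is_chaotic : Prop := ∀ (s : String), Dom_is_chaotic s → Spec_is_chaotic s (is_chaotic s)

-- ===== LEMMAS AND PROOFS =====

-- skipping elements already in the accumulator leaves the Set fold unchanged
theorem pv_foldl_add_skip {α : Type} [BEq α] [LawfulBEq α]
    (p q : List α) (t : List α) (hp : ∀ x ∈ p, x ∈ t) :
    (p ++ q).foldl PySem.Set.add t = q.foldl PySem.Set.add t := by
  induction p with
  | nil => rfl
  | cons x xs ih =>
      have hx : PySem.Set.add t x = t := by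
        simp [PySem.Set.add]
        exact hp x (by simp)
      simpa [hx] using ih (fun y hy => hp y (by simp [hy]))

-- an accumulator head not occurring in the list stays in front
theorem pv_foldl_add_cons {α : Type} [BEq α] [LawfulBEq α]
    (q : List α) (a : α) (t : List α) (ha : a ∉ q) :
    q.foldl PySem.Set.add (a :: t) = a :: q.foldl PySem.Set.add t := by
  induction q generalizing t with
  | nil => rfl
  | cons x xs ih =>
      have hxa : x ≠ a := fun h => ha (by simp [h])
      have h1 : PySem.Set.add (a :: t) x = a :: PySem.Set.add t x := by
        simp [PySem.Set.add, hxa]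
        split_ifs <;> simp
      have ha' : a ∉ xs := fun h => ha (by simp [h])
      rw [List.foldl_cons, h1, List.foldl_cons, ih _ ha']

-- the Set fold is a sublist of accumulator ++ input
theorem pv_foldl_add_sublist {α : Type} [BEq α]
    (xs : List α) (t : List α) :
    (xs.foldl PySem.Set.add t).Sublist (t ++ xs) := by
  induction xs generalizing t with
  | nil => simp
  | cons x l ih =>
      have h1 : (PySem.Set.add t x).Sublist (t ++ [x]) := by
        unfold PySem.Set.add
        split_ifs with h
        · exact List.sublist_append_left t [x]
        · exact List.Sublist.refl _
      have h2 : ((PySem.Set.add t x) ++ l).Sublist ((t ++ [x]) ++ l) :=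
        h1.append_right l
      have h3 : (l.foldl PySem.Set.add (PySem.Set.add t x)).Sublist ((PySem.Set.add t x) ++ l) := ih _
      simpa [List.append_assoc] using (h3.trans h2)

theorem pv_ofList_sublist {α : Type} [BEq α] (xs : List α) :
    (PySem.Set.ofList xs : List α).Sublist xs := by
  simpa [PySem.Set.ofList_eq_foldl] using pv_foldl_add_sublist xs []

-- len(set(xs)) == len(xs) ↔ xs has no duplicates
theorem pv_len_ofList_eq_iff {α : Type} [BEq α] [LawfulBEq α] (xs : List α) :
    (PySem.Set.ofList xs : List α).length = xs.length ↔ xs.Nodup := by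
  constructor
  · intro h
    have := (pv_ofList_sublist xs).eq_of_length h
    rw [← this]; exact PySem.Set.nodup_ofList xs
  · intro h; rw [PySem.Set.ofList_eq_self_of_nodup xs h]

-- run lengths of a sorted char list = counts of its distinct chars, in order
theorem pv_runs_sorted_eq (t : List Char) (hs : t.Pairwise (· ≤ ·)) :
    pvRuns t = (PySem.Set.ofList t : List Char).map (fun c => (t.count c : Int)) := by
  induction t using pvRuns.induct with
  | case1 => simp [pvRuns, PySem.Set.ofList]
  | case2 c cs ih =>
    have hs' : cs.Pairwise (· ≤ ·) := hs.of_cons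
    set p := cs.takeWhile (fun x => x == c) with hpdef
    set q := cs.dropWhile (fun x => x == c) with hqdef
    have hcs : p ++ q = cs := List.takeWhile_append_dropWhile
    have hpmem : ∀ x ∈ p, x = c := by
      intro x hx
      simpa using List.mem_takeWhile_imp hx
    have hqpair : q.Pairwise (· ≤ ·) := List.Pairwise.sublist (List.dropWhile_sublist _) hs'
    have hcle : ∀ x ∈ cs, c ≤ x := by
      intro x hx; exact (List.pairwise_cons.mp hs).1 x hx
    have hq : c ∉ q := by
      intro hcq
      have hqne : q ≠ [] := by intro h; rw [h] at hcq; exact absurd hcq (List.not_mem_nil)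
      have hhead : (q.head hqne == c) = false := List.head_dropWhile_not _ hqne
      have hdne : q.head hqne ≠ c := by simpa using hhead
      have hdcs : q.head hqne ∈ cs := (List.dropWhile_sublist _).mem (List.head_mem hqne)
      have h1 : c ≤ q.head hqne := hcle _ hdcs
      have hcq' : c ∈ q.head hqne :: q.tail := by
        rw [List.cons_head_tail]; exact hcq
      rcases List.mem_cons.mp hcq' with h | h
      · exact hdne h.symm
      · have hq2 : (q.head hqne :: q.tail).Pairwise (· ≤ ·) := by
          rw [List.cons_head_tail]; exact hqpair
        exact hdne (le_antisymm ((List.pairwise_cons.mp hq2).1 c h) h1)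
    have hset : (PySem.Set.ofList (c :: cs) : List Char) = c :: PySem.Set.ofList q := by
      have e1 : (PySem.Set.ofList (c :: cs) : List Char) = (p ++ q).foldl PySem.Set.add [c] := by
        rw [PySem.Set.ofList_eq_foldl, hcs]
        rfl
      rw [e1, pv_foldl_add_skip p q [c] (fun x hx => by simp [hpmem x hx]),
        pv_foldl_add_cons q c [] hq, PySem.Set.ofList_eq_foldl]
    have hcount_c : ((c :: cs).count c : Int) = (p.length + 1 : Int) := by
      have h1 : p.count c = p.length := by
        rw [List.count_eq_length]
        intro x hx; simpa using (hpmem x hx).symm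
      have h2 : q.count c = 0 := List.count_eq_zero.mpr hq
      rw [← hcs]
      simp [List.count_append, h1, h2]
    have hcount_rest : ∀ c' ∈ (PySem.Set.ofList q : List Char),
        ((c :: cs).count c' : Int) = (q.count c' : Int) := by
      intro c' hc'
      have hc'q : c' ∈ q := (PySem.Set.mem_ofList q c').mp hc'
      have hne : c' ≠ c := fun h => hq (h ▸ hc'q)
      have hnp : c' ∉ p := fun h => hne (hpmem c' h)
      rw [← hcs]
      simp [List.count_append, Ne.symm hne, List.count_eq_zero.mpr hnp]
    rw [pvRuns, hset, List.map_cons, ← hpdef, ← hqdef, ih hqpair, hcount_c]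
    congr 1
    rw [List.map_congr_left]
    intro c' hc'
    exact (hcount_rest c' hc').symm

-- adjacent-equal scan on a (≤)-sorted list decides Nodup
theorem pv_adj_scan (ys : List Int) (hs : ys.Pairwise (· ≤ ·)) :
    ((ys.zip (ys.drop 1)).any (fun p => p.1 == p.2) = false) ↔ ys.Nodup := by
  induction ys with
  | nil => simp
  | cons a t ih =>
    match t with
    | [] => simp
    | b :: u =>
      have hs' : (b :: u).Pairwise (· ≤ ·) := hs.of_cons
      have hab : a ≤ b := (List.pairwise_cons.mp hs).1 b (by simp)
      have hau : ∀ x ∈ u, a ≤ x := fun x hx => (List.pairwise_cons.mp hs).1 x (by simp [hx])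
      have hbu : ∀ x ∈ u, b ≤ x := fun x hx => (List.pairwise_cons.mp hs').1 x hx
      simp only [List.drop_succ_cons, List.drop_zero, List.zip_cons_cons, List.any_cons,
        Bool.or_eq_false_iff, beq_eq_false_iff_ne, ne_eq]
      simp only [List.drop_succ_cons, List.drop_zero] at ih
      rw [ih hs']
      constructor
      · rintro ⟨hne, hnd⟩
        refine List.nodup_cons.mpr ⟨?_, hnd⟩
        intro hmem
        rcases List.mem_cons.mp hmem with h | h
        · exact hne h
        · exact hne (le_antisymm hab (hbu a h))
      · intro hnd
        have := List.nodup_cons.mp hnd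
        exact ⟨fun h => this.1 (by simp [h]), this.2⟩

-- the two branch conditions agree
theorem pv_eq (s : String) : is_chaotic s = is_chaotic_alt s := by
  classical
  set L := s.toList with hL
  set countsA : List Int := (PySem.Set.ofList L : List Char).map (fun k => (L.count k : Int)) with hCA
  set T := PySem.List.sorted L (fun c => c) false with hT
  have hTperm : T.Perm L := PySem.List.sorted_perm L (fun c => c) false
  have hTpair : T.Pairwise (· ≤ ·) := by
    simpa using PySem.List.sorted_pairwise L (fun c => c)
  -- A's condition is Nodup countsA
  have hA : is_chaotic s = if countsA.Nodup then "TOHRU" else "ELMA" := by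
    simp only [is_chaotic, PySem.Dict.foldl_insert_getD_add_one_eq_counter,
      PySem.Dict.values, PySem.Dict.size, PySem.Dict.items_counter, List.map_map,
      Function.comp_def, PySem.Set.len, ← hL, ← hCA]
    have hlen : ((PySem.Set.ofList L : List Char).map (fun k => (k, (L.count k : Int)))).length
        = countsA.length := by simp [hCA]
    rw [hlen]
    by_cases h : countsA.Nodup
    · rw [if_pos (by simpa using (pv_len_ofList_eq_iff countsA).mpr h), if_pos h]
    · rw [if_neg (by simpa using fun hc => h ((pv_len_ofList_eq_iff countsA).mp hc)), if_neg h]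
  -- B's condition is Nodup (pvRuns T)
  have hB : is_chaotic_alt s = if (pvRuns T).Nodup then "TOHRU" else "ELMA" := by
    simp only [is_chaotic_alt, ← hL, ← hT]
    set runs := pvRuns T with hruns
    set sr := PySem.List.sorted runs (fun x => x) false with hsr
    have hsrpair : sr.Pairwise (· ≤ ·) := by
      simpa using PySem.List.sorted_pairwise runs (fun x => x)
    have hsrperm : sr.Perm runs := PySem.List.sorted_perm runs (fun x => x) false
    have key : ((sr.zip (sr.drop 1)).any (fun p => p.1 == p.2) = false) ↔ runs.Nodup := by
      rw [pv_adj_scan sr hsrpair, hsrperm.nodup_iff]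
    by_cases h : runs.Nodup
    · rw [if_neg (fun ht => by rw [key.mpr h] at ht; cases ht), if_pos h]
    · have hne : ¬ ((sr.zip (sr.drop 1)).any (fun p => p.1 == p.2) = false) :=
        fun hf => h (key.mp hf)
      have htrue : ((sr.zip (sr.drop 1)).any (fun p => p.1 == p.2)) = true := by
        cases hv : ((sr.zip (sr.drop 1)).any (fun p => p.1 == p.2))
        · exact absurd hv hne
        · rfl
      rw [if_pos htrue, if_neg h]
  -- the two conditions coincide
  have hperm : countsA.Perm (pvRuns T) := by
    rw [pv_runs_sorted_eq T hTpair]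
    have hSperm : (PySem.Set.ofList L : List Char).Perm (PySem.Set.ofList T : List Char) := by
      rw [List.perm_ext_iff_of_nodup (PySem.Set.nodup_ofList L) (PySem.Set.nodup_ofList T)]
      intro a
      rw [PySem.Set.mem_ofList, PySem.Set.mem_ofList, hTperm.mem_iff]
    have hmap : ((PySem.Set.ofList T : List Char).map (fun c => (T.count c : Int)))
        = (PySem.Set.ofList T : List Char).map (fun k => (L.count k : Int)) := by
      apply List.map_congr_left
      intro c _
      rw [hTperm.count_eq]
    rw [hmap, hCA]
    exact hSperm.map _
  rw [hA, hB]
  by_cases h : countsA.Nodup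
  · rw [if_pos h, if_pos (hperm.nodup_iff.mp h)]
  · rw [if_neg h, if_neg (fun hr => h (hperm.nodup_iff.mpr hr))]

-- ===== VERDICT (by name: the statement is the Claim_ definition above) =====
theorem is_chaotic_spec : Claim_equal_is_chaotic := by
  intro s _
  unfold Spec_is_chaotic
  exact pv_eq s
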